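-- pv_equiv track=rewrite | github.com/njcuk9999/apero-drs | INTROOT/SpirouDRS/spirouStartup/test_processing.py | parallelize
-- ===== SOURCE A (Python) =====
-- from collections import OrderedDict
--
-- def parallelize(jobs, processes):
--     # deal with less entries than max_number
--     if processes > len(jobs):
--         processes = len(jobs)
--     # storage for groups
--     groups = OrderedDict()
--     # loop around groups
--     for it in range(processes):
--         # get name
--         name = 'Group {0}/{1}'.format(it + 1, processes)
--         groups[name] = jobs[it::processes]
--     # return groups
--     return groups
-- ===== SOURCE B (Python) =====
-- from collections import OrderedDict
--
-- def parallelize(jobs, processes):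
--     # clamp the number of groups, then distribute jobs round-robin in one pass
--     n = min(processes, len(jobs))
--     groups = OrderedDict(('Group {0}/{1}'.format(k + 1, n), []) for k in range(n))
--     if n > 0:
--         for j, job in enumerate(jobs):
--             groups['Group {0}/{1}'.format(j % n + 1, n)].append(job)
--     return groups
-- ===== Notes on version B (the rewrite author's own statement) =====
-- stated objective: alternative
-- what changed: Instead of building each group by a strided slice jobs[it::n], B pre-creates the n named empty groups and distributes the jobs in one round-robin pass over enumerate(jobs), appending job j to group j % n.
import Mathlib
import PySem

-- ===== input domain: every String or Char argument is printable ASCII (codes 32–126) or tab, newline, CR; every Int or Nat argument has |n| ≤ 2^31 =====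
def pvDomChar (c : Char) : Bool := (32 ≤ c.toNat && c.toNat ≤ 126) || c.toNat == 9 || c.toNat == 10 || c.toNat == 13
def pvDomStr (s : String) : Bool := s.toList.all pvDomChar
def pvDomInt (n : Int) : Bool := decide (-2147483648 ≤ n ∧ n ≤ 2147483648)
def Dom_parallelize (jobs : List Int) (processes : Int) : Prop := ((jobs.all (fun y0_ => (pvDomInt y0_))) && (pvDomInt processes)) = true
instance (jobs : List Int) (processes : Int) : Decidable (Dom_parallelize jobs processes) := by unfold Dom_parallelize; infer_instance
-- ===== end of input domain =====

-- B replaces A's per-group strided slicing by a single round-robin pass over enumerate(jobs); same cost, different decomposition.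

-- shared helper: the group name 'Group {i}/{p}' ('{}'.format of an int is str())
def gname (i p : Int) : String :=
  String.ofList ("Group ".toList ++ PySem.Int.toChars i ++ '/' :: PySem.Int.toChars p)

-- ===== PORT A =====
def parallelize (jobs : List Int) (processes : Int) : List (String × List Int) :=
  let p := if processes > PySem.List.len jobs then PySem.List.len jobs else processes
  ((PySem.List.pyRange 0 p 1).foldl
    (fun (groups : PySem.Dict String (List Int)) it =>
      -- jobs[it::p]; inside the loop 0 ≤ it < p, so the step p is nonzero and slice? is never none
      groups.insert (gname (it + 1) p) ((PySem.List.slice? jobs (some it) none p).getD []))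
    PySem.Dict.empty).items

-- ===== PORT B =====
def parallelize_alt (jobs : List Int) (processes : Int) : List (String × List Int) :=
  let n := min processes (PySem.List.len jobs)
  let init : PySem.Dict String (List Int) :=
    (PySem.List.pyRange 0 n 1).foldl (fun d k => d.insert (gname (k + 1) n) []) PySem.Dict.empty
  (if 0 < n then
      (PySem.List.enumerate jobs).foldl
        (fun d q => d.modify (gname (PySem.Int.mod q.1 n + 1) n) [] (fun g => g ++ [q.2])) init
    else init).items

-- ===== PRECONDITION & SPEC =====
def Spec_parallelize (jobs : List Int) (processes : Int) (out : List (String × List Int)) : Prop := out = parallelize_alt jobs processes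
instance (jobs : List Int) (processes : Int) (out : List (String × List Int)) : Decidable (Spec_parallelize jobs processes out) := by unfold Spec_parallelize; infer_instance

-- ===== CLAIM (what is proved, stated in full; the proofs are below) =====
def Claim_equal_parallelize : Prop := ∀ (jobs : List Int) (processes : Int), Dom_parallelize jobs processes → Spec_parallelize jobs processes (parallelize jobs processes)

-- ===== LEMMAS AND PROOFS =====

-- decimal digit string of a Nat, fuel-free (what Nat.toDigits 10 computes)
def digs (m : Nat) : List Char :=
  if _h : m < 10 then [Nat.digitChar m]
  else digs (m / 10) ++ [Nat.digitChar (m % 10)]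
decreasing_by exact Nat.div_lt_self (by omega) (by omega)

lemma digs_ne_nil (m : Nat) : digs m ≠ [] := by
  unfold digs; split <;> simp

lemma toDigitsCore_eq_digs : ∀ (f n : Nat) (l : List Char), n < f →
    Nat.toDigitsCore 10 f n l = digs n ++ l := by
  intro f
  induction f with
  | zero => intro n l h; omega
  | succ f ih =>
    intro n l h
    rw [Nat.toDigitsCore]
    by_cases h10 : n < 10
    · have : n / 10 = 0 := Nat.div_eq_of_lt h10
      simp only [this]
      rw [digs]
      simp [h10, Nat.mod_eq_of_lt h10]
    · have hd : n / 10 ≠ 0 := by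
        intro hz; have := Nat.div_eq_of_lt (by omega : n < 10 * 1); omega
      simp only [if_neg hd]
      rw [ih (n / 10) _ (by have := Nat.div_lt_self (by omega : 0 < n) (by omega : 1 < 10); omega)]
      conv_rhs => rw [digs]
      simp [h10]

lemma toDigits_eq_digs (n : Nat) : Nat.toDigits 10 n = digs n := by
  have := toDigitsCore_eq_digs (n + 1) n [] (by omega)
  simpa [Nat.toDigits] using this

lemma digitChar_inj {a b : Nat} (ha : a < 10) (hb : b < 10)
    (h : Nat.digitChar a = Nat.digitChar b) : a = b := by
  interval_cases a <;> interval_cases b <;> simp_all [Nat.digitChar]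

lemma digs_inj : ∀ (m n : Nat), digs m = digs n → m = n := by
  intro m
  induction m using Nat.strong_induction_on with
  | _ m ih =>
    intro n h
    rw [digs] at h
    conv at h => rhs; rw [digs]
    by_cases hm : m < 10 <;> by_cases hn : n < 10
    · rw [dif_pos hm, dif_pos hn] at h
      exact digitChar_inj hm hn (by simpa using h)
    · rw [dif_pos hm, dif_neg hn] at h
      have hl := congrArg List.length h
      simp at hl
      exact absurd hl.symm.symm (digs_ne_nil _)
    · rw [dif_neg hm, dif_pos hn] at h
      have hl := congrArg List.length h
      simp at hl
      exact absurd hl (digs_ne_nil _)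
    · rw [dif_neg hm, dif_neg hn] at h
      obtain ⟨h1, h2⟩ := List.append_inj' h (by simp)
      have e1 := ih (m / 10) (Nat.div_lt_self (by omega) (by omega)) (n / 10) h1
      have e2 : m % 10 = n % 10 :=
        digitChar_inj (Nat.mod_lt _ (by omega)) (Nat.mod_lt _ (by omega)) (by simpa using h2)
      omega

lemma toChars_inj_nonneg {a b : Int} (ha : 0 ≤ a) (hb : 0 ≤ b)
    (h : PySem.Int.toChars a = PySem.Int.toChars b) : a = b := by
  unfold PySem.Int.toChars at h
  rw [if_neg (by omega), if_neg (by omega), toDigits_eq_digs, toDigits_eq_digs] at h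
  have := digs_inj _ _ h
  omega

lemma gname_inj {a b p : Int} (ha : 0 ≤ a) (hb : 0 ≤ b) (h : gname a p = gname b p) :
    a = b := by
  unfold gname at h
  exact toChars_inj_nonneg ha hb
    (List.append_cancel_left (List.append_cancel_right (String.ofList_inj.mp h)))

-- round-robin picker: every n-th element, starting after skipping d
def pick {α : Type} (xs : List α) (d n : Nat) : List α :=
  match xs, d with
  | [], _ => []
  | x :: xs, 0 => x :: pick xs (n - 1) n
  | _ :: xs, Nat.succ d => pick xs d n

lemma pick_getElem? {α : Type} : ∀ (xs : List α) (d m n : Nat), 0 < n →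
    (pick xs d n)[m]? = xs[d + n * m]? := by
  intro xs
  induction xs with
  | nil => intro d m n hn; simp [pick]
  | cons x xs ih =>
    intro d m n hn
    cases d with
    | zero =>
      cases m with
      | zero => simp [pick]
      | succ m =>
        rw [pick]
        rw [show 0 + n * (m + 1) = ((n - 1) + n * m) + 1 from by rw [Nat.mul_succ]; omega]
        rw [List.getElem?_cons_succ, List.getElem?_cons_succ]
        exact ih (n - 1) m n hn
    | succ d =>
      rw [pick]
      rw [show (d + 1) + n * m = (d + n * m) + 1 from by omega]
      rw [List.getElem?_cons_succ]
      exact ih d m n hn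

lemma pick_eq_nil_of_le {α : Type} (xs : List α) (d n : Nat) (hn : 0 < n)
    (h : xs.length ≤ d) : pick xs d n = [] := by
  apply List.ext_getElem?
  intro m
  rw [pick_getElem? xs d m n hn]
  have : xs.length ≤ d + n * m := by omega
  simp [List.getElem?_eq_none this]

lemma filterMap_range_eq_pick {α : Type} : ∀ (xs : List α) (d n : Nat), 0 < n →
    (List.range ((xs.length - d + n - 1) / n)).filterMap (fun k => xs[d + n * k]?)
      = pick xs d n := by
  intro xs
  induction xs with
  | nil =>
    intro d n hn
    simp [pick]
  | cons x xs ih =>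
    intro d n hn
    cases d with
    | zero =>
      have hc : ((x :: xs).length - 0 + n - 1) / n = (xs.length - (n - 1) + n - 1) / n + 1 := by
        have hL : (x :: xs).length - 0 + n - 1 = xs.length + n := by
          simp only [List.length_cons]; omega
        have hR : (xs.length - (n - 1) + n - 1) / n = xs.length / n := by
          rcases Nat.lt_or_ge xs.length (n - 1) with h | h
          · rw [show xs.length - (n - 1) + n - 1 = n - 1 from by omega,
              Nat.div_eq_of_lt (by omega), Nat.div_eq_of_lt (by omega)]
          · rw [show xs.length - (n - 1) + n - 1 = xs.length from by omega]
        rw [hL, hR, Nat.add_div_right _ hn]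
      rw [hc, List.range_succ_eq_map, List.filterMap_cons, List.filterMap_map]
      simp only [Nat.mul_zero, Nat.add_zero, List.getElem?_cons_zero]
      rw [pick]
      congr 1
      rw [← ih (n - 1) n hn]
      apply List.filterMap_congr
      intro k _
      simp only [Function.comp]
      rw [show 0 + n * Nat.succ k = ((n - 1) + n * k) + 1 from by rw [Nat.mul_succ]; omega]
      rw [List.getElem?_cons_succ]
    | succ d =>
      have hc : ((x :: xs).length - (d + 1) + n - 1) / n = (xs.length - d + n - 1) / n := by
        have h1 : (x :: xs).length - (d + 1) = xs.length - d := by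
          simp only [List.length_cons]; omega
        rw [h1]
      rw [hc, pick, ← ih d n hn]
      apply List.filterMap_congr
      intro k _
      rw [show (d + 1) + n * k = (d + n * k) + 1 from by omega]
      rw [List.getElem?_cons_succ]

lemma toNat_div_cast (a b : Nat) : ((a : Int) / (b : Int)).toNat = a / b := by
  exact Nat.add_zero (a.div b)

lemma slice?_eq_pick {α : Type} (xs : List α) (it n : Int) (h0 : 0 ≤ it) (hn : it < n) :
    (PySem.List.slice? xs (some it) none n).getD [] = pick xs it.toNat n.toNat := by
  obtain ⟨I, rfl⟩ : ∃ I : Nat, it = (I : Int) := ⟨it.toNat, by omega⟩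
  obtain ⟨N, rfl⟩ : ∃ N : Nat, n = (N : Int) := ⟨n.toNat, by omega⟩
  have hnn : 0 < N := by omega
  rw [PySem.List.slice?]
  simp only [PySem.List.sliceIndices, if_neg (show ¬ (N : Int) = 0 by omega),
    if_neg (show ¬ (N : Int) < 0 by omega), if_neg (show ¬ (I : Int) < 0 by omega),
    if_pos (show (0 : Int) < (N : Int) by omega), Option.getD_some, Int.toNat_natCast]
  rcases Nat.lt_or_ge I xs.length with hlt | hge
  · have hmin : min (I : Int) (xs.length : Int) = (I : Int) := by omega
    rw [hmin, if_pos (by omega : (I : Int) < (xs.length : Int))]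
    have hcnt : (((xs.length : Int) - (I : Int) + (N : Int) - 1) / (N : Int)).toNat
        = (xs.length - I + N - 1) / N := by
      rw [show ((xs.length : Int) - (I : Int) + (N : Int) - 1)
          = ((xs.length - I + N - 1 : Nat) : Int) from by omega]
      exact toNat_div_cast _ _
    rw [hcnt, ← filterMap_range_eq_pick xs I N hnn]
    apply List.filterMap_congr
    intro k _
    have hidx : (((I : Int) + (N : Int) * (k : Nat)).toNat) = I + N * k := by
      rw [← Nat.cast_mul, ← Nat.cast_add, Int.toNat_natCast]
    rw [hidx]
  · have hmin : min (I : Int) (xs.length : Int) = (xs.length : Int) := by omega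
    rw [hmin, if_neg (by omega : ¬ ((xs.length : Int) < (xs.length : Int)))]
    simp [pick_eq_nil_of_le xs I N hnn hge]

lemma emod_pred_of_zero {a n : Int} (hn : 0 < n) (h : a % n = 0) :
    (a - 1) % n = n - 1 := by
  obtain ⟨q, hq⟩ : n ∣ a := Int.dvd_of_emod_eq_zero h
  rw [show a - 1 = (n - 1) + n * (q - 1) from by rw [hq]; ring,
    Int.add_mul_emod_self_left, Int.emod_eq_of_lt (by omega) (by omega)]

lemma emod_pred_of_pos {a n : Int} (hn : 0 < n) (h : 0 < a % n) :
    (a - 1) % n = a % n - 1 := by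
  have hlt : a % n < n := Int.emod_lt_of_pos a hn
  have hdm := Int.emod_add_mul_ediv a n
  rw [show a - 1 = (a % n - 1) + n * (a / n) from by omega,
    Int.add_mul_emod_self_left, Int.emod_eq_of_lt (by omega) (by omega)]

lemma filter_enumerate_eq_pick {α : Type} (it n : Int) (h0 : 0 ≤ it) (hn : it < n) :
    ∀ (xs : List α) (s : Int), 0 ≤ s →
    ((PySem.List.enumerate xs s).filter (fun p => PySem.Int.mod p.1 n == it)).map (·.2)
      = pick xs ((it - s) % n).toNat n.toNat := by
  have hnp : (0:Int) < n := lt_of_le_of_lt h0 hn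
  intro xs
  induction xs with
  | nil => intro s hs; simp [PySem.List.enumerate_nil, pick]
  | cons x xs ih =>
    intro s hs
    rw [PySem.List.enumerate_cons, List.filter_cons]
    have hmod : PySem.Int.mod s n = s % n := PySem.Int.mod_eq_emod_of_pos hnp
    by_cases hd : (it - s) % n = 0
    · have hcond : s % n = it := by
        have := Int.emod_eq_emod_iff_emod_sub_eq_zero.mpr hd
        rw [Int.emod_eq_of_lt h0 hn] at this
        exact this.symm
      rw [if_pos (by simp [hmod, hcond])]
      rw [List.map_cons, ih (s + 1) (by omega)]
      rw [hd, show it - (s + 1) = (it - s) - 1 from by ring,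
        emod_pred_of_zero hnp hd]
      rw [show ((0:Int)).toNat = 0 from rfl, pick]
      congr 2
      omega
    · have hdp : 0 < (it - s) % n := by
        have := Int.emod_nonneg (it - s) (by omega : n ≠ 0)
        omega
      have hcond : ¬ (s % n = it) := by
        intro hc
        exact hd (Int.emod_eq_emod_iff_emod_sub_eq_zero.mp
          (by rw [Int.emod_eq_of_lt h0 hn, hc]))
      rw [if_neg (by simp [hmod, hcond])]
      rw [ih (s + 1) (by omega)]
      rw [show it - (s + 1) = (it - s) - 1 from by ring, emod_pred_of_pos hnp hdp]
      have ht : ((it - s) % n).toNat = ((it - s) % n - 1).toNat + 1 := by omega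
      rw [ht, pick]

lemma set_update_of_forall_mem {α : Type} [BEq α] [LawfulBEq α] :
    ∀ (l : List α) (s : PySem.Set α), (∀ x ∈ l, x ∈ s) → PySem.Set.update s l = s := by
  intro l
  induction l with
  | nil => intro s _; rfl
  | cons x l ih =>
    intro s h
    show PySem.Set.update (PySem.Set.add s x) l = s
    rw [PySem.Set.add_of_mem (h x List.mem_cons_self)]
    exact ih s fun y hy => h y (List.mem_cons_of_mem _ hy)

-- ===== VERDICT (by name: the statement is the Claim_ definition above) =====
theorem parallelize_spec : Claim_equal_parallelize := by
  intro jobs processes _dom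
  show parallelize jobs processes = parallelize_alt jobs processes
  rw [parallelize, parallelize_alt]
  have hminp : (if processes > PySem.List.len jobs then PySem.List.len jobs else processes)
      = min processes (PySem.List.len jobs) := by
    simp only [PySem.List.len_eq]; split_ifs <;> omega
  simp only [hminp]
  set n := min processes (PySem.List.len jobs) with hn
  have hnL : n ≤ (jobs.length : Int) := by
    rw [hn, PySem.List.len_eq]; exact min_le_right _ _
  rcases (by omega : n ≤ 0 ∨ 0 < n) with hle | hpos
  · rw [PySem.List.pyRange_one_eq_nil hle, if_neg (by omega)]
    rfl
  · -- positive case: both sides are lists of the n named groups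
    rw [if_pos hpos]
    set initD := (PySem.List.pyRange 0 n 1).foldl
        (fun (d : PySem.Dict String (List Int)) k => d.insert (gname (k + 1) n) [])
        PySem.Dict.empty with hInitDef
    set finD := (PySem.List.enumerate jobs).foldl
        (fun d q => d.modify (gname (PySem.Int.mod q.1 n + 1) n) [] (fun g => g ++ [q.2])) initD
      with hFinDef
    have hknodup : ((PySem.List.pyRange 0 n 1).map (fun it => gname (it + 1) n)).Nodup := by
      apply List.Nodup.map_on _ (PySem.List.nodup_pyRange_one 0 n)
      intro x hx y hy hxy
      have hx0 := (PySem.List.mem_pyRange_one.mp hx).1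
      have hy0 := (PySem.List.mem_pyRange_one.mp hy).1
      have := gname_inj (by omega) (by omega) hxy
      omega
    have hAitems :
        ((PySem.List.pyRange 0 n 1).foldl
          (fun (groups : PySem.Dict String (List Int)) it =>
            groups.insert (gname (it + 1) n) ((PySem.List.slice? jobs (some it) none n).getD []))
          PySem.Dict.empty).items
        = (PySem.List.pyRange 0 n 1).map
            (fun it => (gname (it + 1) n, (PySem.List.slice? jobs (some it) none n).getD [])) := by
      have := PySem.Dict.items_foldl_insert_fresh (PySem.List.pyRange 0 n 1)
        (fun it => gname (it + 1) n)
        (fun it => (PySem.List.slice? jobs (some it) none n).getD [])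
        PySem.Dict.empty (fun a _ => PySem.Dict.contains_empty _) hknodup
      simpa using this
    have hInitItems : initD.items
        = (PySem.List.pyRange 0 n 1).map (fun it => (gname (it + 1) n, ([] : List Int))) := by
      have := PySem.Dict.items_foldl_insert_fresh (PySem.List.pyRange 0 n 1)
        (fun it => gname (it + 1) n) (fun _ => ([] : List Int))
        PySem.Dict.empty (fun a _ => PySem.Dict.contains_empty _) hknodup
      rw [hInitDef]
      simpa using this
    have hInitKeys : initD.keys = (PySem.List.pyRange 0 n 1).map (fun it => gname (it + 1) n) := by
      show initD.items.map (·.1) = _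
      rw [hInitItems, List.map_map]
      rfl
    have hInitNodup : initD.keys.Nodup := by rw [hInitKeys]; exact hknodup
    have hFinKeys : finD.keys = initD.keys := by
      rw [hFinDef]
      have hk := PySem.Dict.keys_foldl_modify_key (PySem.List.enumerate jobs)
        (fun q : Int × Int => gname (PySem.Int.mod q.1 n + 1) n) ([] : List Int)
        (fun _ q => fun g => g ++ [q.2]) initD
      simp only [hk]
      apply set_update_of_forall_mem
      intro x hx
      rcases List.mem_map.mp hx with ⟨q, _, rfl⟩
      rw [hInitKeys]
      exact List.mem_map.mpr ⟨PySem.Int.mod q.1 n,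
        PySem.List.mem_pyRange_one.mpr
          ⟨PySem.Int.mod_nonneg _ hpos, PySem.Int.mod_lt _ hpos⟩, rfl⟩
    have hFinNodup : finD.keys.Nodup := by rw [hFinKeys]; exact hInitNodup
    have hgetD : ∀ it ∈ PySem.List.pyRange 0 n 1,
        finD.getD (gname (it + 1) n) [] = pick jobs it.toNat n.toNat := by
      intro it hit
      obtain ⟨h0, hlt⟩ := PySem.List.mem_pyRange_one.mp hit
      have hfold : finD = ((PySem.List.enumerate jobs).map
            (fun q : Int × Int => (gname (PySem.Int.mod q.1 n + 1) n, q.2))).foldl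
          (fun d p => d.modify p.1 [] (fun g => g ++ [p.2])) initD := by
        rw [hFinDef]
        exact (List.foldl_map
          (f := fun q : Int × Int => (gname (PySem.Int.mod q.1 n + 1) n, q.2))
          (g := fun d p => d.modify p.1 [] fun g => g ++ [p.2])
          (l := PySem.List.enumerate jobs) (init := initD)).symm
      rw [hfold, PySem.Dict.getD_foldl_modify_append]
      have hmem : (gname (it + 1) n, ([] : List Int)) ∈ initD.items := by
        rw [hInitItems]; exact List.mem_map.mpr ⟨it, hit, rfl⟩
      rw [PySem.Dict.getD_of_mem_items initD hmem hInitNodup [], List.nil_append]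
      rw [List.filter_map, List.map_map]
      have hcond : ∀ q ∈ PySem.List.enumerate jobs,
          ((fun p : String × Int => p.1 == gname (it + 1) n) ∘
            (fun q : Int × Int => (gname (PySem.Int.mod q.1 n + 1) n, q.2))) q
          = (fun q : Int × Int => PySem.Int.mod q.1 n == it) q := by
        intro q _
        by_cases h : PySem.Int.mod q.1 n = it
        · simp [Function.comp, h]
        · have hne : gname (PySem.Int.mod q.1 n + 1) n ≠ gname (it + 1) n := by
            intro he
            have hm0 := PySem.Int.mod_nonneg q.1 hpos
            have := gname_inj (by omega) (by omega) he
            omega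
          simp [Function.comp, h, hne]
      rw [List.filter_congr hcond]
      have := filter_enumerate_eq_pick it n h0 hlt jobs 0 (le_refl 0)
      rw [sub_zero, Int.emod_eq_of_lt h0 hlt] at this
      exact this
    have hFinItems : finD.items
        = finD.keys.map (fun c => (c, finD.getD c [])) :=
      PySem.Dict.items_eq_map_keys finD hFinNodup []
    rw [hAitems, hFinItems, hFinKeys, hInitKeys, List.map_map]
    apply List.map_congr_left
    intro it hit
    obtain ⟨h0, hlt⟩ := PySem.List.mem_pyRange_one.mp hit
    simp only [Function.comp]
    rw [slice?_eq_pick jobs it n h0 hlt, hgetD it hit]
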